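-- pv_equiv track=rewrite | github.com/posgnu/ctfs | defcon2017_LV/clemency/ROPcle/disassemble.py | binary2code
-- ===== SOURCE A (Python) =====
-- def binary2code(binary):
--     binstr = ""
--     for c in binary:
--         binstr += bin(c)[2:].rjust(8, '0')
--
--     length = len(binstr)
--     byte_arr = [0 for i in range(length // 9)]
--
--     for i in range(length // 9):
--         bytestr = binstr[9 * i: 9 * (i+1)]
--         byte_arr[i] = int(bytestr, 2)
--
--     return byte_arr
-- ===== SOURCE B (Python) =====
-- def binary2code(binary):
--     acc = 0
--     bits = 0
--     out = []
--     for c in binary: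
--         acc = (acc << 8) | c
--         bits += 8
--         while bits >= 9:
--             bits -= 9
--             out.append(acc >> bits)
--             acc &= (1 << bits) - 1
--     return out
-- ===== Notes on version B (the rewrite author's own statement) =====
-- stated objective: alternative
-- what changed: Replaces building a whole '0'/'1' string and re-slicing 9-char windows with a single-pass streaming integer bit accumulator (shift each byte in, shift/mask 9-bit words out); Pre_ excludes lists with an element outside 0..255, where A's bin/rjust string construction yields a '-0b'-polluted or silently widened bit stream (raising ValueError or returning an accidental value).
-- outside the precondition, e.g. on binary2code([5, -1]): A returns [10], B returns [-1]; on binary2code([256]): A returns [256], B returns []; on binary2code([0, 300]): A returns [1], B returns [2]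
import Mathlib
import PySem

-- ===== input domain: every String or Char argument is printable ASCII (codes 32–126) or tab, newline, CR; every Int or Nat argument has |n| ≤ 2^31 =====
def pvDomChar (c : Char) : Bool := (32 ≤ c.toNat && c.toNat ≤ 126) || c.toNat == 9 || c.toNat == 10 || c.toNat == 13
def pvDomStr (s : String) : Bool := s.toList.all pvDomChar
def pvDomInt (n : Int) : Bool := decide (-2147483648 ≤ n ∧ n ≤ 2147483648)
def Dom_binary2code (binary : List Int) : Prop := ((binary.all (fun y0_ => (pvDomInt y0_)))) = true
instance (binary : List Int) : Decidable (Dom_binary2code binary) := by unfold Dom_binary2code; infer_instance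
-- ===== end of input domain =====

-- B streams bits through an integer accumulator instead of building and re-slicing a binary string; same words, one pass, no string.

-- ===== PORT A =====
-- bin(n)[2:] for n ≥ 0 (msb first, '0' for 0); exact on Pre_ (all elements nonnegative)
def pvBinAux (n : Nat) : List Char :=
  if h : n = 0 then [] else pvBinAux (n / 2) ++ [if n % 2 = 1 then '1' else '0']
decreasing_by exact Nat.div_lt_self (Nat.pos_of_ne_zero h) (by norm_num)

def pvBinRepr (n : Nat) : List Char := if n = 0 then ['0'] else pvBinAux n

def binary2code (binary : List Int) : List Int :=
  -- binstr built by appending bin(c)[2:].rjust(8,'0') for each byte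
  let binstr := binary.foldl (fun s c =>
      let d := pvBinRepr c.toNat
      s ++ (List.replicate (8 - d.length) '0' ++ d)) []
  let length := binstr.length
  -- byte_arr[i] = int(binstr[9*i : 9*(i+1)], 2); int(_,2) exact here since binstr is '0'/'1' chars
  (List.range (length / 9)).map (fun i =>
      let bytestr := (binstr.drop (9 * i)).take 9
      bytestr.foldl (fun a ch => 2 * a + (if ch = '1' then (1:Int) else 0)) 0)

-- ===== PORT B =====
-- the inner 'while bits >= 9' loop: acc >> k = floordiv by 2^k and acc & (2^k - 1) = mod 2^k,
-- both exact for Python ints (positive modulus)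
def pvEmit (acc : Int) (bits : Nat) (out : List Int) : Int × Nat × List Int :=
  if 9 ≤ bits then
    let bits' := bits - 9
    let d : Int := 2 ^ bits'
    pvEmit (PySem.Int.mod acc d) bits' (out ++ [PySem.Int.floordiv acc d])
  else (acc, bits, out)

def binary2code_alt (binary : List Int) : List Int :=
  let s := binary.foldl (fun (st : Int × Nat × List Int) c =>
      let acc := st.1 * 256 + c   -- (acc << 8) | c; exact on Pre_: acc ≥ 0 and 0 ≤ c < 256, so OR is addition
      pvEmit acc (st.2.1 + 8) st.2.2) ((0:Int), (0:Nat), ([] : List Int))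
  s.2.2

-- ===== PRECONDITION & SPEC =====
-- Pre_ excludes lists with an element outside 0..255: there A's bin(c)[2:].rjust(8,'0') is not the
-- 8-bit pattern of a byte — negative elements inject '-'/'b' characters (A raises ValueError or
-- returns a value parsed from a polluted window), and elements ≥ 256 silently widen the stream —
-- both artefacts of A's string construction, not values of a byte sequence.
def Pre_binary2code (binary : List Int) : Prop := ∀ c ∈ binary, 0 ≤ c ∧ c < 256
instance (binary : List Int) : Decidable (Pre_binary2code binary) := by unfold Pre_binary2code; infer_instance
def pvWitness_binary2code : List Int := [5, 255, 3]

def Spec_binary2code (binary : List Int) (out : List Int) : Prop := out = binary2code_alt binary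
instance (binary : List Int) (out : List Int) : Decidable (Spec_binary2code binary out) := by unfold Spec_binary2code; infer_instance

-- ===== CLAIM (what is proved, stated in full; the proofs are below) =====
def Claim_equal_binary2code : Prop := ∀ (binary : List Int), Dom_binary2code binary → Pre_binary2code binary → Spec_binary2code binary (binary2code binary)

-- ===== LEMMAS AND PROOFS =====

-- value of a list of '0'/'1' characters, in Nat
def pvVal (l : List Char) : Nat := l.foldl (fun a ch => 2 * a + (if ch = '1' then 1 else 0)) 0

-- the common specification: consecutive 9-bit windows of a bit string
def pvChunks (l : List Char) : List Nat :=
  if h : 9 ≤ l.length then pvVal (l.take 9) :: pvChunks (l.drop 9) else []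
decreasing_by simp [List.length_drop]; omega

-- padded bit string of one byte
def pvPadded (c : Int) : List Char :=
  let d := pvBinRepr c.toNat
  List.replicate (8 - d.length) '0' ++ d

theorem pvVal_aux (l : List Char) (a : Nat) :
    l.foldl (fun a ch => 2 * a + (if ch = '1' then 1 else 0)) a
      = a * 2 ^ l.length + pvVal l := by
  induction l generalizing a with
  | nil => simp [pvVal]
  | cons c t ih =>
    simp only [pvVal, List.foldl_cons, List.length_cons]
    rw [ih (2 * a + (if c = '1' then 1 else 0)), ih (2 * 0 + (if c = '1' then 1 else 0))]
    ring

theorem pvVal_append (a b : List Char) :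
    pvVal (a ++ b) = pvVal a * 2 ^ b.length + pvVal b := by
  simp only [pvVal, List.foldl_append]
  exact pvVal_aux b _

theorem pvVal_lt (l : List Char) : pvVal l < 2 ^ l.length := by
  induction l with
  | nil => simp [pvVal]
  | cons c t ih =>
    have h1 : pvVal (c :: t) = (if c = '1' then 1 else 0) * 2 ^ t.length + pvVal t := by
      simp only [pvVal, List.foldl_cons]
      have := pvVal_aux t (2 * 0 + (if c = '1' then 1 else 0))
      simpa using this
    have hb : (if c = '1' then 1 else 0) ≤ 1 := by split <;> omega
    have : pvVal (c :: t) < 2 * 2 ^ t.length := by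
      rw [h1]
      have : (if c = '1' then 1 else 0) * 2 ^ t.length ≤ 1 * 2 ^ t.length :=
        mul_le_mul_right' hb _
      rw [one_mul] at this
      omega
    simpa [List.length_cons, Nat.pow_succ, Nat.mul_comm] using this

theorem pvVal_int (l : List Char) (a : Nat) :
    l.foldl (fun a ch => 2 * a + (if ch = '1' then (1:Int) else 0)) (a : Int)
      = ((l.foldl (fun a ch => 2 * a + (if ch = '1' then 1 else 0)) a : Nat) : Int) := by
  induction l generalizing a with
  | nil => simp
  | cons c t ih =>
    simp only [List.foldl_cons]
    have : (2 * (a:Int) + (if c = '1' then (1:Int) else 0))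
        = ((2 * a + (if c = '1' then 1 else 0) : Nat) : Int) := by
      split <;> push_cast <;> ring
    rw [this, ih]

theorem pvBinAux_length_le (n k : Nat) (h : n < 2 ^ k) : (pvBinAux n).length ≤ k := by
  induction n using Nat.strong_induction_on generalizing k with
  | _ n ih =>
    by_cases h0 : n = 0
    · simp [pvBinAux, h0]
    · rw [pvBinAux, dif_neg h0]
      have hk : k ≠ 0 := by
        intro hk0; rw [hk0] at h; omega
      have hdiv : n / 2 < 2 ^ (k - 1) := by
        have : 2 ^ k = 2 * 2 ^ (k - 1) := by
          conv_lhs => rw [show k = (k - 1) + 1 from by omega]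
          ring
        omega
      have := ih (n / 2) (Nat.div_lt_self (Nat.pos_of_ne_zero h0) (by norm_num)) (k - 1) hdiv
      simp only [List.length_append, List.length_cons, List.length_nil]
      omega

theorem pvVal_binAux (n : Nat) : pvVal (pvBinAux n) = n := by
  induction n using pvBinAux.induct with
  | case1 => simp [pvBinAux, pvVal]
  | case2 n h ih =>
    rw [pvBinAux, dif_neg h, pvVal_append, ih]
    have : pvVal [if n % 2 = 1 then '1' else '0'] = n % 2 := by
      rcases Nat.mod_two_eq_zero_or_one n with h2 | h2 <;> simp [pvVal, h2]
    simp only [List.length_cons, List.length_nil, this]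
    omega

theorem pvVal_binRepr (n : Nat) : pvVal (pvBinRepr n) = n := by
  unfold pvBinRepr
  split
  · simp [pvVal, *]
  · exact pvVal_binAux n

theorem pvVal_replicate (k : Nat) : pvVal (List.replicate k '0') = 0 := by
  induction k with
  | zero => rfl
  | succ k ih =>
    have : List.replicate (k+1) '0' = '0' :: List.replicate k '0' := rfl
    simp only [this, pvVal, List.foldl_cons] at *
    simpa using ih

theorem pvVal_padded (c : Int) (hc : 0 ≤ c) : pvVal (pvPadded c) = c.toNat := by
  unfold pvPadded
  rw [pvVal_append, pvVal_replicate, pvVal_binRepr]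
  simp

theorem pvBinRepr_length_le (n : Nat) (h : n < 256) : (pvBinRepr n).length ≤ 8 := by
  unfold pvBinRepr
  split
  · simp
  · exact pvBinAux_length_le n 8 (by omega)

theorem pvPadded_length (c : Int) (hc : 0 ≤ c) (hlt : c < 256) : (pvPadded c).length = 8 := by
  unfold pvPadded
  have h8 : (pvBinRepr c.toNat).length ≤ 8 :=
    pvBinRepr_length_le c.toNat (by omega)
  simp only [List.length_append, List.length_replicate]
  omega

-- A's range/map loop equals pvChunks
theorem pvChunks_windows (l : List Char) :
    (List.range (l.length / 9)).map (fun i => pvVal ((l.drop (9 * i)).take 9))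
      = pvChunks l := by
  induction l using pvChunks.induct with
  | case1 l h ih =>
    have h9 : (l.drop 9).length = l.length - 9 := by simp
    have hlen : l.length / 9 = (l.length - 9) / 9 + 1 := by omega
    rw [pvChunks, dif_pos h, ← ih, hlen, List.range_succ_eq_map, List.map_cons, List.map_map, h9]
    refine congrArg₂ List.cons (by simp) ?_
    apply List.map_congr_left
    intro i _
    show pvVal (List.take 9 (List.drop (9 * (i + 1)) l))
        = pvVal (List.take 9 (List.drop (9 * i) (List.drop 9 l)))
    rw [List.drop_drop]
    congr 3
    omega
  | case2 l h =>
    have : l.length / 9 = 0 := by omega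
    rw [pvChunks, dif_neg h, this]
    simp

-- splitting lemma for pvChunks
theorem pvChunks_append (l m : List Char) :
    pvChunks (l ++ m) = pvChunks l ++ pvChunks (l.drop (9 * (l.length / 9)) ++ m) := by
  induction l using pvChunks.induct with
  | case1 l h ih =>
    have e1 : pvChunks l = pvVal (l.take 9) :: pvChunks (l.drop 9) := by
      rw [pvChunks, dif_pos h]
    have hm : 9 ≤ (l ++ m).length := by simp; omega
    have e2 : pvChunks (l ++ m) = pvVal ((l ++ m).take 9) :: pvChunks ((l ++ m).drop 9) := by
      rw [pvChunks, dif_pos hm]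
    have e3 : (l.drop 9).drop (9 * ((l.drop 9).length / 9)) = l.drop (9 * (l.length / 9)) := by
      rw [List.drop_drop]
      congr 1
      simp only [List.length_drop]
      omega
    rw [e2, List.take_append_of_le_length h, List.drop_append_of_le_length h, ih, e3, e1]
    simp
  | case2 l h =>
    have e : pvChunks l = [] := by rw [pvChunks, dif_neg h]
    have h0 : l.length / 9 = 0 := by omega
    rw [e, h0]
    simp

theorem pvEmit_spec (l : List Char) (out : List Int) :
    pvEmit ((pvVal l : Nat) : Int) l.length out
      = (((pvVal (l.drop (9 * (l.length / 9))) : Nat) : Int),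
         (l.drop (9 * (l.length / 9))).length,
         out ++ (pvChunks l).map (fun n : Nat => (n : Int))) := by
  induction l using pvChunks.induct generalizing out with
  | case2 l h =>
    rw [pvEmit, if_neg h]
    have h0 : l.length / 9 = 0 := by omega
    rw [pvChunks, dif_neg h, h0]
    simp
  | case1 l h ih =>
    have h9 : (l.drop 9).length = l.length - 9 := by simp
    have hsplit : pvVal l = pvVal (l.take 9) * 2 ^ (l.length - 9) + pvVal (l.drop 9) := by
      conv_lhs => rw [← List.take_append_drop 9 l]
      rw [pvVal_append, h9]
    have hr : pvVal (l.drop 9) < 2 ^ (l.length - 9) := by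
      have := pvVal_lt (l.drop 9); rwa [h9] at this
    have hdint : ((2:Int) ^ (l.length - 9)) = (((2 ^ (l.length - 9) : Nat) : Int)) := by push_cast; ring
    have hdiv : pvVal l / 2 ^ (l.length - 9) = pvVal (l.take 9) := by
      rw [hsplit, Nat.mul_comm, Nat.mul_add_div (by positivity), Nat.div_eq_of_lt hr]
      omega
    have hmod : pvVal l % 2 ^ (l.length - 9) = pvVal (l.drop 9) := by
      rw [hsplit, Nat.mul_comm, Nat.mul_add_mod, Nat.mod_eq_of_lt hr]
    rw [pvEmit, if_pos h]
    simp only [hdint, PySem.Int.floordiv_natCast, PySem.Int.mod_natCast, hdiv, hmod]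
    rw [← h9, ih]
    have e3 : (l.drop 9).drop (9 * ((l.drop 9).length / 9)) = l.drop (9 * (l.length / 9)) := by
      rw [List.drop_drop]
      congr 1
      simp only [List.length_drop]
      omega
    have ec : pvChunks l = pvVal (l.take 9) :: pvChunks (l.drop 9) := by
      rw [pvChunks, dif_pos h]
    rw [e3, ec]
    simp

theorem pvFlat_aux (cs : List Int) (s0 : List Char) :
    cs.foldl (fun s c =>
        let d := pvBinRepr c.toNat
        s ++ (List.replicate (8 - d.length) '0' ++ d)) s0
      = s0 ++ (cs.map pvPadded).flatten := by
  induction cs generalizing s0 with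
  | nil => simp
  | cons c t ih => simp [ih, pvPadded, List.append_assoc]

theorem pvFlat_eq (binary : List Int) :
    binary.foldl (fun s c =>
        let d := pvBinRepr c.toNat
        s ++ (List.replicate (8 - d.length) '0' ++ d)) []
      = (binary.map pvPadded).flatten := by
  simpa using pvFlat_aux binary []

theorem pvA_chunks (binary : List Int) :
    binary2code binary = (pvChunks ((binary.map pvPadded).flatten)).map (fun n : Nat => (n : Int)) := by
  unfold binary2code
  rw [pvFlat_eq]
  have hv : ∀ w : List Char,
      w.foldl (fun a ch => 2 * a + (if ch = '1' then (1:Int) else 0)) 0 = ((pvVal w : Nat) : Int) := by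
    intro w
    simpa [pvVal] using pvVal_int w 0
  simp only [hv]
  rw [← pvChunks_windows, List.map_map]
  rfl

theorem pvB_invariant (cs : List Int) (hcs : ∀ c ∈ cs, 0 ≤ c ∧ c < 256)
    (r : List Char) (hr : r.length < 9) (out : List Int) :
    (cs.foldl (fun (st : Int × Nat × List Int) c =>
        pvEmit (st.1 * 256 + c) (st.2.1 + 8) st.2.2)
        (((pvVal r : Nat) : Int), r.length, out)).2.2
      = out ++ (pvChunks (r ++ (cs.map pvPadded).flatten)).map (fun n : Nat => (n : Int)) := by
  induction cs generalizing r out with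
  | nil =>
    have : pvChunks r = [] := by
      rw [pvChunks, dif_neg (by omega)]
    simp [this]
  | cons c t ih =>
    obtain ⟨hc, hlt⟩ := hcs c (by simp)
    have hw : (pvPadded c).length = 8 := pvPadded_length c hc hlt
    have hacc : ((pvVal r : Nat) : Int) * 256 + c
        = ((pvVal (r ++ pvPadded c) : Nat) : Int) := by
      rw [pvVal_append, pvVal_padded c hc, hw]
      push_cast [Int.toNat_of_nonneg hc]
      ring
    have hbits : r.length + 8 = (r ++ pvPadded c).length := by
      simp [hw]
    simp only [List.foldl_cons]
    rw [hacc, hbits]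
    set L := r ++ pvPadded c with hL
    rw [pvEmit_spec L out]
    have hl' : (L.drop (9 * (L.length / 9))).length < 9 := by
      simp only [List.length_drop]
      omega
    rw [ih (fun x hx => hcs x (by simp [hx])) _ hl']
    rw [List.map_cons, List.flatten_cons, show r ++ (pvPadded c ++ (t.map pvPadded).flatten)
        = L ++ (t.map pvPadded).flatten from by simp [hL], pvChunks_append L ((t.map pvPadded).flatten)]
    simp

-- ===== VERDICT (by name: the statement is the Claim_ definition above) =====
theorem binary2code_spec : Claim_equal_binary2code := by
  intro binary _ hpre
  unfold Spec_binary2code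
  have hB := pvB_invariant binary hpre [] (by simp) []
  rw [pvA_chunks]
  simp only [binary2code_alt]
  rw [show (((pvVal ([] : List Char) : Nat) : Int), ([] : List Char).length, ([] : List Int)) = ((0:Int), (0:Nat), ([] : List Int)) from rfl] at hB
  simp only [hB, List.nil_append]
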